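-- pv_equiv track=rewrite | github.com/ztstiefel/python | flask-test.py | get_char_diff
-- ===== SOURCE A (Python) =====
-- def get_char_diff(text1, text2):
--     char_diff = {}
--
--     # Remove spaces and newlines from text1 and text2
--     text1 = text1.replace(" ", "").replace("\n", "")
--     text2 = text2.replace(" ", "").replace("\n", "")
--
--     # text1 and text2 iterations, based on user input vars
--     for char in text1:
--         if char in char_diff:
--             char_diff[char] -= 1
--         else:
--             char_diff[char] = -1
--
--     for char in text2:
--         if char in char_diff:
--             char_diff[char] += 1
--         else:
--             char_diff[char] = 1
--
--     # Remove characters that are extra in text1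
--     char_diff = {char: count for char, count in char_diff.items() if count != 0}
--
--     # Return updated dictionary
--     return char_diff
-- ===== SOURCE B (Python) =====
-- def get_char_diff(text1, text2):
--     t1 = text1.replace(" ", "").replace("\n", "")
--     t2 = text2.replace(" ", "").replace("\n", "")
--     return {c: diff for c in dict.fromkeys(t1 + t2)
--             if (diff := t2.count(c) - t1.count(c)) != 0}
-- ===== Notes on version B (the rewrite author's own statement) =====
-- stated objective: idiomatic
-- what changed: Replaces A's two accumulating passes over a shared mutable dict with an ordered distinct-character enumeration (dict.fromkeys) plus per-character count scans in a single dict comprehension.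
import Mathlib
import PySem

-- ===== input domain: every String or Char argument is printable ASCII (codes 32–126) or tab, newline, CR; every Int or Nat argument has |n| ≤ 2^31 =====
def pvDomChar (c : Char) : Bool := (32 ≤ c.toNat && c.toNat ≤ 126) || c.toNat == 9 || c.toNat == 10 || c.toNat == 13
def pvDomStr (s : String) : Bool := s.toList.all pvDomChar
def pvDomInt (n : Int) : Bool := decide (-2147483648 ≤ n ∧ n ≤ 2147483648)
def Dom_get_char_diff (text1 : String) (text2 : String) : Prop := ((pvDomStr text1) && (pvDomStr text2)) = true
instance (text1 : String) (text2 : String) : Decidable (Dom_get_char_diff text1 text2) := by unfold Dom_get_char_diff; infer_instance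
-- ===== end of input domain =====

-- B replaces A's two accumulating passes over a shared mutable dict with an ordered
-- distinct-character enumeration plus per-character count differences (idiomatic; not claimed faster).


-- ===== PORT A =====
-- literal transliteration of A: strip " " and "\n", two dict-accumulating passes, drop zero counts;
-- the returned dict is rendered as its items list (keys are 1-char strings).
def get_char_diff (text1 : String) (text2 : String) : List (String × Int) :=
  let t1 : List Char := PySem.Chars.replace (PySem.Chars.replace text1.toList [' '] []) ['\n'] []
  let t2 : List Char := PySem.Chars.replace (PySem.Chars.replace text2.toList [' '] []) ['\n'] []
  let d1 : PySem.Dict Char Int :=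
    t1.foldl (fun d c => if d.contains c then d.modify c 0 (· - 1) else d.insert c (-1)) PySem.Dict.empty
  let d2 : PySem.Dict Char Int :=
    t2.foldl (fun d c => if d.contains c then d.modify c 0 (· + 1) else d.insert c 1) d1
  (d2.items.filter (fun p => p.2 != 0)).map (fun p => (String.ofList [p.1], p.2))

-- ===== PORT B =====
-- transliteration of Source B: dict.fromkeys ordered dedup, then a comprehension keeping nonzero
-- count differences; t2.count(c) with a 1-character needle is the occurrence count of that char.
def get_char_diff_alt (text1 : String) (text2 : String) : List (String × Int) :=
  let t1 : List Char := PySem.Chars.replace (PySem.Chars.replace text1.toList [' '] []) ['\n'] []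
  let t2 : List Char := PySem.Chars.replace (PySem.Chars.replace text2.toList [' '] []) ['\n'] []
  (PySem.List.dedup (t1 ++ t2)).filterMap (fun c =>
    let diff : Int := (PySem.List.count t2 c : Int) - (PySem.List.count t1 c : Int)
    if diff != 0 then some (String.ofList [c], diff) else none)

-- ===== PRECONDITION & SPEC =====
def Spec_get_char_diff (text1 : String) (text2 : String) (out : List (String × Int)) : Prop := out = get_char_diff_alt text1 text2
instance (text1 : String) (text2 : String) (out : List (String × Int)) : Decidable (Spec_get_char_diff text1 text2 out) := by unfold Spec_get_char_diff; infer_instance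

-- ===== CLAIM (what is proved, stated in full; the proofs are below) =====
def Claim_equal_get_char_diff : Prop := ∀ (text1 : String) (text2 : String), Dom_get_char_diff text1 text2 → Spec_get_char_diff text1 text2 (get_char_diff text1 text2)

-- ===== LEMMAS AND PROOFS =====

-- A's first-pass branch is exactly 'decrement with default 0'
theorem pvStepSub (d : PySem.Dict Char Int) (c : Char) :
    (if d.contains c then d.modify c 0 (· - 1) else d.insert c (-1)) = d.modify c 0 (· - 1) := by
  by_cases h : d.contains c = true
  · simp [h]
  · simp only [Bool.not_eq_true] at h
    simp [h, PySem.Dict.modify, PySem.Dict.getD_of_not_contains _ _ h]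

-- A's second-pass branch is exactly 'increment with default 0'
theorem pvStepAdd (d : PySem.Dict Char Int) (c : Char) :
    (if d.contains c then d.modify c 0 (· + 1) else d.insert c 1) = d.modify c 0 (· + 1) := by
  by_cases h : d.contains c = true
  · simp [h]
  · simp only [Bool.not_eq_true] at h
    simp [h, PySem.Dict.modify, PySem.Dict.getD_of_not_contains _ _ h]

-- the decrement loop: lookup after the fold subtracts the occurrence count
theorem pvGetDSub (l : List Char) (d : PySem.Dict Char Int) (v : Char) :
    (l.foldl (fun d x => d.modify x 0 (· - 1)) d).getD v 0 = d.getD v 0 - (l.count v : Int) := by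
  induction l generalizing d with
  | nil => simp
  | cons a l ih =>
    simp only [List.foldl_cons, ih, PySem.Dict.getD_modify, List.count_cons]
    by_cases h : v = a
    · subst h
      simp only [beq_self_eq_true, if_true]
      push_cast
      omega
    · simp [h, Ne.symm h]

-- a comprehension with a filter clause is filter-then-map
theorem pvFilterMapIte {α β : Type} (q : α → Bool) (f : α → β) (l : List α) :
    l.filterMap (fun a => if q a then some (f a) else none) = (l.filter q).map f := by
  induction l with
  | nil => rfl
  | cons a l ih => by_cases h : q a <;> simp [h, ih]

-- the items of A's fully-built dict, before the nonzero filter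
theorem pvItemsA (l1 l2 : List Char) :
    ((l2.foldl (fun d c => if d.contains c then d.modify c 0 (· + 1) else d.insert c 1)
      (l1.foldl (fun d c => if d.contains c then d.modify c 0 (· - 1) else d.insert c (-1))
        PySem.Dict.empty)).items)
    = (PySem.List.dedup (l1 ++ l2)).map
        (fun c => (c, ((l2.count c : Int) - (l1.count c : Int)))) := by
  simp only [pvStepSub, pvStepAdd]
  have hnd : ((l2.foldl (fun d c => d.modify c 0 (· + 1))
      (l1.foldl (fun d c => d.modify c 0 (· - 1)) (PySem.Dict.empty : PySem.Dict Char Int))).keys).Nodup := by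
    exact PySem.Dict.nodup_keys_foldl_modify_key l2 (fun c => c) 0 (fun _ _ v => v + 1) _
      (PySem.Dict.nodup_keys_foldl_modify_key l1 (fun c => c) 0 (fun _ _ v => v - 1) _
        PySem.Dict.nodup_keys_empty)
  refine (PySem.Dict.items_eq_map_keys _ hnd 0).trans ?_
  have hk1 : (l1.foldl (fun d c => d.modify c 0 (· - 1)) (PySem.Dict.empty : PySem.Dict Char Int)).keys
      = PySem.Set.ofList l1 :=
    (PySem.Dict.keys_foldl_modify l1 0 (fun _ _ v => v - 1) _).trans
      (by rw [PySem.Dict.keys_empty, PySem.Set.update_nil_left])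
  have hkeys : (l2.foldl (fun d c => d.modify c 0 (· + 1))
      (l1.foldl (fun d c => d.modify c 0 (· - 1)) (PySem.Dict.empty : PySem.Dict Char Int))).keys
      = PySem.List.dedup (l1 ++ l2) :=
    (PySem.Dict.keys_foldl_modify l2 0 (fun _ _ v => v + 1) _).trans
      (by rw [hk1]; simp [PySem.Set.ofList_append])
  rw [hkeys]
  apply List.map_congr_left
  intro c _
  have h2 := PySem.Dict.getD_foldl_modify_add_one l2
    (l1.foldl (fun d c => d.modify c 0 (· - 1)) (PySem.Dict.empty : PySem.Dict Char Int)) c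
  have h1 := pvGetDSub l1 (PySem.Dict.empty : PySem.Dict Char Int) c
  have hval : (l2.foldl (fun d c => d.modify c 0 (· + 1))
      (l1.foldl (fun d c => d.modify c 0 (· - 1)) (PySem.Dict.empty : PySem.Dict Char Int))).getD c 0
      = ((l2.count c : Int) - (l1.count c : Int)) := by
    rw [h2, h1, PySem.Dict.getD_empty]
    omega
  rw [hval]

-- A's filtered items equal B's comprehension, over the stripped char lists
theorem pvMain (l1 l2 : List Char) :
    (((l2.foldl (fun d c => if d.contains c then d.modify c 0 (· + 1) else d.insert c 1)
        (l1.foldl (fun d c => if d.contains c then d.modify c 0 (· - 1) else d.insert c (-1))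
          PySem.Dict.empty)).items).filter (fun p => p.2 != 0)).map
            (fun p => (String.ofList [p.1], p.2))
    = (PySem.List.dedup (l1 ++ l2)).filterMap (fun c =>
        let diff : Int := (PySem.List.count l2 c : Int) - (PySem.List.count l1 c : Int)
        if diff != 0 then some (String.ofList [c], diff) else none) := by
  rw [pvItemsA, List.filter_map, List.map_map]
  simp only [PySem.List.count_eq]
  rw [pvFilterMapIte
    (fun c => ((l2.count c : Int) - (l1.count c : Int)) != 0)
    (fun c => (String.ofList [c], (l2.count c : Int) - (l1.count c : Int)))]
  rfl

-- ===== VERDICT (by name: the statement is the Claim_ definition above) =====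
theorem get_char_diff_spec : Claim_equal_get_char_diff := by
  intro text1 text2 _
  unfold Spec_get_char_diff get_char_diff get_char_diff_alt
  exact pvMain _ _
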